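-- pv_equiv track=rewrite | github.com/hamk-uas/UNELMAT-app | ml_app/scripts/blister_comparison.py | generate_histogram
-- ===== SOURCE A (Python) =====
-- def calculate_size(bbox):
--     return (bbox[2] - bbox[0]) * (bbox[3] - bbox[1])
--
-- def categorize_size(size):
--     if size < 100:
--         return 'small'
--     elif size < 500:
--         return 'medium'
--     else:
--         return 'large'
--
-- def generate_histogram(detections):
--     sizes = [calculate_size(bbox[:4]) for bbox in detections]
--     categories = [categorize_size(size) for size in sizes]
--     return {
--         'small': categories.count('small'),
--         'medium': categories.count('medium'),
--         'large': categories.count('large')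
--     }
-- ===== SOURCE B (Python) =====
-- def _bisect_left(a, x):
--     lo, hi = 0, len(a)
--     while lo < hi:
--         mid = (lo + hi) // 2
--         if a[mid] < x:
--             lo = mid + 1
--         else:
--             hi = mid
--     return lo
--
-- def generate_histogram(detections):
--     sizes = sorted((b[2] - b[0]) * (b[3] - b[1]) for b in detections)
--     i1 = _bisect_left(sizes, 100)
--     i2 = _bisect_left(sizes, 500)
--     return {'small': i1, 'medium': i2 - i1, 'large': len(sizes) - i2}
-- ===== Notes on version B (the rewrite author's own statement) =====
-- stated objective: alternative
-- what changed: B sorts the bbox areas once and finds the positions of the 100 and 500 thresholds by hand-written binary search, deriving all three counts from the two boundary indices by subtraction, instead of classifying each element into a label list and counting labels.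
import Mathlib
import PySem

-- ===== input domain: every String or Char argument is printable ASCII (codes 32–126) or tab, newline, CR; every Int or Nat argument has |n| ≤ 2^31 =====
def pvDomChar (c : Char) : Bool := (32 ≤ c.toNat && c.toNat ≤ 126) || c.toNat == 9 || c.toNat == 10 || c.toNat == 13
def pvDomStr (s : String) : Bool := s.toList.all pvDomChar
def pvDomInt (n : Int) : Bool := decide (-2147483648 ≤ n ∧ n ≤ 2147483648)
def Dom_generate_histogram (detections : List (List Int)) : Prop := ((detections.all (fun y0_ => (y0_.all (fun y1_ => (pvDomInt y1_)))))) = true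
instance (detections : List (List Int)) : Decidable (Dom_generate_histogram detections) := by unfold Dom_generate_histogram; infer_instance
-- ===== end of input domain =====

-- B sorts the areas once and finds the 100/500 threshold positions by hand-written binary
-- search, deriving all three counts by subtraction — a different algorithm, not claimed faster.

-- ===== PORT A =====
-- calculate_size(bbox): bbox[i] is exact on Pre_ (every bbox has ≥ 4 entries, so indices 0..3 are in range)
def calculate_size (bbox : List Int) : Int :=
  (PySem.List.pyGetD bbox 2 0 - PySem.List.pyGetD bbox 0 0) *
  (PySem.List.pyGetD bbox 3 0 - PySem.List.pyGetD bbox 1 0)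

def categorize_size (size : Int) : String :=
  if size < 100 then "small"
  else if size < 500 then "medium"
  else "large"

def generate_histogram (detections : List (List Int)) : List (String × Int) :=
  let sizes := detections.map (fun bbox => calculate_size (PySem.List.slice bbox none (some 4)))
  let categories := sizes.map categorize_size
  [("small", (categories.count "small" : Int)),
   ("medium", (categories.count "medium" : Int)),
   ("large", (categories.count "large" : Int))]

-- ===== PORT B =====
-- _bisect_left's while loop, fuel = a.length (hi - lo shrinks each iteration, so this suffices);
-- a[mid] is in range whenever lo < hi ≤ len, matching Python's a[mid]
def bisectLoop (a : List Int) (x : Int) : Nat → Nat → Nat → Nat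
  | 0, lo, _ => lo
  | fuel+1, lo, hi =>
    if lo < hi then
      match a[(lo + hi) / 2]? with
      | some y => if y < x then bisectLoop a x fuel ((lo + hi) / 2 + 1) hi
                  else bisectLoop a x fuel lo ((lo + hi) / 2)
      | none => lo
    else lo

def bisect_left (a : List Int) (x : Int) : Nat :=
  bisectLoop a x a.length 0 a.length

def generate_histogram_alt (detections : List (List Int)) : List (String × Int) :=
  let sizes := PySem.List.sorted (detections.map (fun b =>
      (PySem.List.pyGetD b 2 0 - PySem.List.pyGetD b 0 0) *
      (PySem.List.pyGetD b 3 0 - PySem.List.pyGetD b 1 0))) (fun x => x) false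
  let i1 := bisect_left sizes 100
  let i2 := bisect_left sizes 500
  [("small", (i1 : Int)), ("medium", (i2 : Int) - (i1 : Int)),
   ("large", (sizes.length : Int) - (i2 : Int))]

-- ===== PRECONDITION & SPEC =====
-- Pre_: every bbox has at least 4 entries; on a shorter bbox Python A raises IndexError in calculate_size.
def Pre_generate_histogram (detections : List (List Int)) : Prop :=
  ∀ bbox ∈ detections, 4 ≤ bbox.length
instance (detections : List (List Int)) : Decidable (Pre_generate_histogram detections) := by
  unfold Pre_generate_histogram; infer_instance
def pvWitness_generate_histogram : List (List Int) := [[0, 0, 5, 5], [0, 0, 30, 30]]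

def Spec_generate_histogram (detections : List (List Int)) (out : List (String × Int)) : Prop := out = generate_histogram_alt detections
instance (detections : List (List Int)) (out : List (String × Int)) : Decidable (Spec_generate_histogram detections out) := by unfold Spec_generate_histogram; infer_instance

-- ===== CLAIM (what is proved, stated in full; the proofs are below) =====
def Claim_equal_generate_histogram : Prop := ∀ (detections : List (List Int)), Dom_generate_histogram detections → Pre_generate_histogram detections → Spec_generate_histogram detections (generate_histogram detections)

-- ===== LEMMAS AND PROOFS =====

-- my hand-ported bisect loop is PySem's bisect_left loop (same structure)
theorem bisectLoop_eq (a : List Int) (x : Int) : ∀ fuel lo hi,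
    bisectLoop a x fuel lo hi = PySem.List.bisectLeftLoop a x fuel lo hi := by
  intro fuel
  induction fuel with
  | zero => intro lo hi; rfl
  | succ f ih =>
    intro lo hi
    simp only [bisectLoop, PySem.List.bisectLeftLoop]
    split
    · cases a[(lo + hi) / 2]? with
      | none => rfl
      | some y => by_cases hy : y < x <;> simp [hy, ih]
    · rfl

theorem bisect_left_eq (a : List Int) (x : Int) :
    bisect_left a x = PySem.List.bisectLeft a x := by
  unfold bisect_left PySem.List.bisectLeft
  exact bisectLoop_eq a x a.length 0 a.length

-- on a sorted list, bisect_left x is the number of elements < x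
theorem bisect_left_countP (xs : List Int) (x : Int)
    (hs : List.Pairwise (· ≤ ·) xs) :
    bisect_left xs x = xs.countP (fun s => decide (s < x)) := by
  rw [bisect_left_eq]
  obtain ⟨hk, hlt, hge⟩ := PySem.List.bisectLeft_spec xs x hs
  set k := PySem.List.bisectLeft xs x with hkdef
  have hsplit : xs = xs.take k ++ xs.drop k := (List.take_append_drop k xs).symm
  rw [hsplit, List.countP_append]
  have h1 : (xs.take k).countP (fun s => decide (s < x)) = k := by
    rw [List.countP_eq_length.mpr, List.length_take_of_le hk]
    intro y hy
    obtain ⟨j, hj, rfl⟩ := List.mem_iff_getElem.mp hy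
    have hjk : j < k := lt_of_lt_of_le hj (by simp [List.length_take])
    have hjlen : j < xs.length := lt_of_lt_of_le hjk hk
    have := hlt j hjlen hjk
    simpa [List.getElem_take] using this
  have h2 : (xs.drop k).countP (fun s => decide (s < x)) = 0 := by
    rw [List.countP_eq_zero]
    intro y hy
    obtain ⟨j, hj, rfl⟩ := List.mem_iff_getElem.mp hy
    have hjlen : k + j < xs.length := by
      have := hj; simp [List.length_drop] at this; omega
    have := hge (k + j) hjlen (Nat.le_add_right k j)
    simp only [List.getElem_drop]
    simp
    omega
  omega

-- the size A computes on the 4-element slice equals the size B computes on the bbox itself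
theorem size_slice_eq (bbox : List Int) :
    calculate_size (PySem.List.slice bbox none (some 4)) =
    (PySem.List.pyGetD bbox 2 0 - PySem.List.pyGetD bbox 0 0) *
    (PySem.List.pyGetD bbox 3 0 - PySem.List.pyGetD bbox 1 0) := by
  have h : PySem.List.slice bbox none (some 4) = bbox.take 4 := by
    simpa using PySem.List.slice_to_natCast (xs := bbox) (b := 4)
  rcases bbox with _ | ⟨a, _ | ⟨b, _ | ⟨c, _ | ⟨d, t⟩⟩⟩⟩ <;>
    (simp [calculate_size, h, PySem.List.pyGetD, PySem.List.pyGet?, PySem.List.pyIdx?];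
     try (split_ifs <;> simp_all <;> omega))

-- counting a label among the categories is counting sizes in the matching range
theorem count_small (l : List Int) :
    (l.map categorize_size).count "small" = l.countP (fun s => decide (s < 100)) := by
  rw [List.count_eq_countP, List.countP_map]
  apply List.countP_congr
  intro s _
  simp only [Function.comp, categorize_size]
  split_ifs with h1 h2 <;> simp_all

theorem count_medium (l : List Int) :
    (l.map categorize_size).count "medium" =
      l.countP (fun s => !decide (s < 100) && decide (s < 500)) := by
  rw [List.count_eq_countP, List.countP_map]
  apply List.countP_congr
  intro s _
  simp only [Function.comp, categorize_size]
  split_ifs with h1 h2 <;> simp_all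

theorem count_large (l : List Int) :
    (l.map categorize_size).count "large" = l.countP (fun s => !decide (s < 500)) := by
  rw [List.count_eq_countP, List.countP_map]
  apply List.countP_congr
  intro s _
  simp only [Function.comp, categorize_size]
  split_ifs with h1 h2 <;> simp_all <;> omega

-- the <500 count splits into the <100 count plus the [100,500) count
theorem countP_split (l : List Int) :
    l.countP (fun s => decide (s < 500)) =
      l.countP (fun s => decide (s < 100)) +
      l.countP (fun s => !decide (s < 100) && decide (s < 500)) := by
  induction l with
  | nil => rfl
  | cons a t ih =>
    simp only [List.countP_cons, ih]
    by_cases h1 : a < 100 <;> by_cases h2 : a < 500 <;> simp [h1, h2] <;> omega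

theorem countP_large_len (l : List Int) :
    l.countP (fun s => !decide (s < 500)) =
      l.length - l.countP (fun s => decide (s < 500)) := by
  induction l with
  | nil => rfl
  | cons a t ih =>
    simp only [List.countP_cons, List.length_cons, ih]
    have := List.countP_le_length (p := fun s : Int => decide (s < 500)) (l := t)
    by_cases h : a < 500 <;> simp [h] <;> omega

-- ===== VERDICT (by name: the statement is the Claim_ definition above) =====
theorem generate_histogram_spec : Claim_equal_generate_histogram := by
  intro detections _ _
  unfold Spec_generate_histogram generate_histogram generate_histogram_alt
  simp only
  set sz := detections.map (fun b =>
      (PySem.List.pyGetD b 2 0 - PySem.List.pyGetD b 0 0) *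
      (PySem.List.pyGetD b 3 0 - PySem.List.pyGetD b 1 0)) with hsz
  have hmap : detections.map (fun bbox => calculate_size (PySem.List.slice bbox none (some 4))) = sz := by
    rw [hsz]; apply List.map_congr_left; intro b _; exact size_slice_eq b
  rw [hmap]
  set srt := PySem.List.sorted sz (fun x => x) false with hsrt
  have hpw : List.Pairwise (· ≤ ·) srt := by
    simpa using PySem.List.sorted_pairwise (xs := sz) (key := fun x => x)
  have hperm : srt.Perm sz := PySem.List.sorted_perm sz (fun x => x) false
  have hc1 : srt.countP (fun s => decide (s < 100)) = sz.countP (fun s => decide (s < 100)) :=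
    hperm.countP_eq _
  have hc2 : srt.countP (fun s => decide (s < 500)) = sz.countP (fun s => decide (s < 500)) :=
    hperm.countP_eq _
  have hlen : srt.length = sz.length := hperm.length_eq
  rw [count_small, count_medium, count_large,
      bisect_left_countP srt 100 hpw, bisect_left_countP srt 500 hpw, hc1, hc2, hlen]
  have hsp := countP_split sz
  have hll := countP_large_len sz
  have h5 := List.countP_le_length (p := fun s : Int => decide (s < 500)) (l := sz)
  have h1 := List.countP_le_length (p := fun s : Int => decide (s < 100)) (l := sz)
  simp only [List.cons.injEq, Prod.mk.injEq, and_true, true_and]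
  constructor <;> push_cast <;> omega
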